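-- pv_equiv track=rewrite | github.com/rossetv/mediaman | src/mediaman/services/download_format.py | build_episode_summary
-- ===== SOURCE A (Python) =====
-- def build_episode_summary(episodes: list[dict]) -> str:
--     """Build a human-readable summary like '2 of 8 episodes ready ...'."""
--     total = len(episodes)
--     ready = sum(1 for e in episodes if e["state"] == "ready")
--     downloading = sum(1 for e in episodes if e["state"] == "downloading")
--     queued = sum(1 for e in episodes if e["state"] == "queued")
--     searching = sum(1 for e in episodes if e["state"] == "searching")
--
--     parts = []
--     if ready:
--         parts.append(f"{ready} of {total} episodes ready")
--     if downloading:
--         parts.append(f"{downloading} downloading")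
--     if queued:
--         parts.append(f"{queued} queued")
--     if searching:
--         parts.append(f"{searching} searching")
--     return " \u00b7 ".join(parts)
-- ===== SOURCE B (Python) =====
-- def build_episode_summary(episodes: list[dict]) -> str:
--     """Build a human-readable summary like '2 of 8 episodes ready ...'."""
--     total = ready = downloading = queued = searching = 0
--     for e in episodes:
--         st = e["state"]
--         total += 1
--         if st == "ready":
--             ready += 1
--         elif st == "downloading":
--             downloading += 1
--         elif st == "queued":
--             queued += 1
--         elif st == "searching":
--             searching += 1
--
--     out = ""
--     sep = ""
--     if ready:
--         out += sep + f"{ready} of {total} episodes ready"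
--         sep = " \u00b7 "
--     if downloading:
--         out += sep + f"{downloading} downloading"
--         sep = " \u00b7 "
--     if queued:
--         out += sep + f"{queued} queued"
--         sep = " \u00b7 "
--     if searching:
--         out += sep + f"{searching} searching"
--     return out
-- ===== Notes on version B (the rewrite author's own statement) =====
-- stated objective: alternative
-- what changed: Replaces A's four separate filtered generator scans plus parts-list/join with a single loop that tallies total and all four states in one pass via an if/elif chain, and builds the result string directly with a separator accumulator instead of collecting a list and joining it.
-- outside the precondition, e.g. on build_episode_summary([{}]): A raises KeyError, B raises KeyError
import Mathlib
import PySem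

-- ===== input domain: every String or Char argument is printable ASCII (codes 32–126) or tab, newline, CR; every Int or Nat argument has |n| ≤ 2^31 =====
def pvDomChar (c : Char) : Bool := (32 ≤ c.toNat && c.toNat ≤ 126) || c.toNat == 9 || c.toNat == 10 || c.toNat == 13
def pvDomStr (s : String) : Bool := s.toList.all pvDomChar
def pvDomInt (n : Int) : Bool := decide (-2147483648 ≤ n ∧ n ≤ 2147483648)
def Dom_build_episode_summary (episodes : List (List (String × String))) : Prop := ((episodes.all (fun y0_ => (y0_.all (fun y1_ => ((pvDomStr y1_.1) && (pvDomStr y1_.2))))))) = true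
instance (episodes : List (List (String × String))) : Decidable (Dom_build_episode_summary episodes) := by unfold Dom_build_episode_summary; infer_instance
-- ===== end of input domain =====

-- B replaces A's four filtered scans + parts-list/join by a single tallying pass (if/elif chain over
-- a 5-tuple accumulator) and direct string building with a separator accumulator. Proved equal on
-- inputs where every episode has a "state" key (Pre_); both Pythons raise KeyError otherwise.

-- ===== PORT A =====
def build_episode_summary (episodes : List (List (String × String))) : String :=
  let total : Int := episodes.length
  let ready : Int := episodes.countP (fun e => (PySem.Dict.mk e).get? "state" == some "ready")
  let downloading : Int := episodes.countP (fun e => (PySem.Dict.mk e).get? "state" == some "downloading")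
  let queued : Int := episodes.countP (fun e => (PySem.Dict.mk e).get? "state" == some "queued")
  let searching : Int := episodes.countP (fun e => (PySem.Dict.mk e).get? "state" == some "searching")
  let parts : List String := []
  let parts := if ready ≠ 0 then parts ++ [PySem.Int.toStr ready ++ " of " ++ PySem.Int.toStr total ++ " episodes ready"] else parts
  let parts := if downloading ≠ 0 then parts ++ [PySem.Int.toStr downloading ++ " downloading"] else parts
  let parts := if queued ≠ 0 then parts ++ [PySem.Int.toStr queued ++ " queued"] else parts
  let parts := if searching ≠ 0 then parts ++ [PySem.Int.toStr searching ++ " searching"] else parts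
  PySem.Str.join " · " parts

-- ===== PORT B =====
-- st = e["state"]; exact under Pre_ (key present — where Python B would raise KeyError, Pre_ excludes the input)
def pvStateKey (e : List (String × String)) : String := (PySem.Dict.mk e).getD "state" ""

-- one loop iteration of B: total += 1 then the if/elif chain on the four states
def pvTallyStep (a : Int × Int × Int × Int × Int) (e : List (String × String)) :
    Int × Int × Int × Int × Int :=
  let st := pvStateKey e
  let t := a.1 + 1
  if st == "ready" then (t, a.2.1 + 1, a.2.2.1, a.2.2.2.1, a.2.2.2.2)
  else if st == "downloading" then (t, a.2.1, a.2.2.1 + 1, a.2.2.2.1, a.2.2.2.2)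
  else if st == "queued" then (t, a.2.1, a.2.2.1, a.2.2.2.1 + 1, a.2.2.2.2)
  else if st == "searching" then (t, a.2.1, a.2.2.1, a.2.2.2.1, a.2.2.2.2 + 1)
  else (t, a.2.1, a.2.2.1, a.2.2.2.1, a.2.2.2.2)

def build_episode_summary_alt (episodes : List (List (String × String))) : String :=
  let a := episodes.foldl pvTallyStep (0, 0, 0, 0, 0)
  let total := a.1
  let ready := a.2.1
  let downloading := a.2.2.1
  let queued := a.2.2.2.1
  let searching := a.2.2.2.2
  let out : String := ""
  let sep : String := ""
  let (out, sep) := if ready ≠ 0 then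
      (out ++ (sep ++ (PySem.Int.toStr ready ++ " of " ++ PySem.Int.toStr total ++ " episodes ready")), " · ")
    else (out, sep)
  let (out, sep) := if downloading ≠ 0 then
      (out ++ (sep ++ (PySem.Int.toStr downloading ++ " downloading")), " · ") else (out, sep)
  let (out, sep) := if queued ≠ 0 then
      (out ++ (sep ++ (PySem.Int.toStr queued ++ " queued")), " · ") else (out, sep)
  let out := if searching ≠ 0 then out ++ (sep ++ (PySem.Int.toStr searching ++ " searching")) else out
  out

-- ===== PRECONDITION & SPEC =====
-- Pre_ excludes episodes missing the "state" key, on which both Pythons raise KeyError.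
def Pre_build_episode_summary (episodes : List (List (String × String))) : Prop :=
  (episodes.all (fun e => (PySem.Dict.mk e).contains "state")) = true
instance (episodes : List (List (String × String))) : Decidable (Pre_build_episode_summary episodes) := by unfold Pre_build_episode_summary; infer_instance

def pvWitness_build_episode_summary : (List (List (String × String))) :=
  [[("state", "ready")], [("state", "queued")], [("title", "x"), ("state", "ready")]]

def Spec_build_episode_summary (episodes : List (List (String × String))) (out : String) : Prop := out = build_episode_summary_alt episodes
instance (episodes : List (List (String × String))) (out : String) : Decidable (Spec_build_episode_summary episodes out) := by unfold Spec_build_episode_summary; infer_instance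

-- ===== CLAIM (what is proved, stated in full; the proofs are below) =====
def Claim_equal_build_episode_summary : Prop := ∀ (episodes : List (List (String × String))), Dom_build_episode_summary episodes → Pre_build_episode_summary episodes → Spec_build_episode_summary episodes (build_episode_summary episodes)

-- ===== LEMMAS AND PROOFS =====

-- B's single tally loop computes the length and A's four filtered counts, generalized over the accumulator.
theorem pv_tally (episodes : List (List (String × String)))
    (hpre : (episodes.all (fun e => (PySem.Dict.mk e).contains "state")) = true)
    (a : Int × Int × Int × Int × Int) :
    episodes.foldl pvTallyStep a =
      (a.1 + episodes.length,
       a.2.1 + (episodes.countP (fun e => (PySem.Dict.mk e).get? "state" == some "ready") : Int),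
       a.2.2.1 + (episodes.countP (fun e => (PySem.Dict.mk e).get? "state" == some "downloading") : Int),
       a.2.2.2.1 + (episodes.countP (fun e => (PySem.Dict.mk e).get? "state" == some "queued") : Int),
       a.2.2.2.2 + (episodes.countP (fun e => (PySem.Dict.mk e).get? "state" == some "searching") : Int)) := by
  induction episodes generalizing a with
  | nil => simp
  | cons e t ih =>
    have hc : (PySem.Dict.mk e).contains "state" = true := by
      have := List.all_eq_true.mp hpre e (List.mem_cons_self ..)
      simpa using this
    have hpre' : (t.all (fun e => (PySem.Dict.mk e).contains "state")) = true := by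
      rw [List.all_eq_true] at hpre ⊢
      exact fun x hx => hpre x (List.mem_cons_of_mem _ hx)
    obtain ⟨v, hv⟩ : ∃ v, (PySem.Dict.mk e).get? "state" = some v := by
      cases hg : (PySem.Dict.mk e).get? "state" with
      | none => rw [(PySem.Dict.get?_eq_none_iff_contains _ _).mp hg] at hc; cases hc
      | some v => exact ⟨v, rfl⟩
    have hk : pvStateKey e = v := by
      simp [pvStateKey, PySem.Dict.getD_eq_get?_getD, hv]
    rw [List.foldl_cons, ih hpre']
    simp only [pvTallyStep, hk, hv, List.countP_cons, List.length_cons]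
    by_cases h1 : v = "ready" <;> by_cases h2 : v = "downloading" <;>
      by_cases h3 : v = "queued" <;> by_cases h4 : v = "searching" <;>
      simp [h1, h2, h3, h4, Prod.ext_iff] <;> push_cast <;> omega

-- A's parts-list/join and B's separator-accumulator build the same string, for any four counts.
theorem pv_format (r d q s t : Int) :
    (let parts : List String := []
     let parts := if r ≠ 0 then parts ++ [PySem.Int.toStr r ++ " of " ++ PySem.Int.toStr t ++ " episodes ready"] else parts
     let parts := if d ≠ 0 then parts ++ [PySem.Int.toStr d ++ " downloading"] else parts
     let parts := if q ≠ 0 then parts ++ [PySem.Int.toStr q ++ " queued"] else parts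
     let parts := if s ≠ 0 then parts ++ [PySem.Int.toStr s ++ " searching"] else parts
     PySem.Str.join " · " parts) =
    (let out : String := ""
     let sep : String := ""
     let (out, sep) := if r ≠ 0 then (out ++ (sep ++ (PySem.Int.toStr r ++ " of " ++ PySem.Int.toStr t ++ " episodes ready")), " · ") else (out, sep)
     let (out, sep) := if d ≠ 0 then (out ++ (sep ++ (PySem.Int.toStr d ++ " downloading")), " · ") else (out, sep)
     let (out, sep) := if q ≠ 0 then (out ++ (sep ++ (PySem.Int.toStr q ++ " queued")), " · ") else (out, sep)
     if s ≠ 0 then out ++ (sep ++ (PySem.Int.toStr s ++ " searching")) else out) := by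
  by_cases hr : r = 0 <;> by_cases hd : d = 0 <;> by_cases hq : q = 0 <;> by_cases hs : s = 0 <;>
    simp [hr, hd, hq, hs, PySem.Str.join, PySem.Chars.join_cons_cons, PySem.Chars.join_singleton,
      PySem.Chars.join_nil, ← PySem.Int.toList_toStr, String.ofList_append, String.ofList_toList,
      String.append_assoc] <;>
    refine Eq.trans (congrArg String.ofList ?_) String.ofList_toList <;> simp

-- ===== VERDICT (by name: the statement is the Claim_ definition above) =====
theorem build_episode_summary_spec : Claim_equal_build_episode_summary := by
  intro episodes _ hpre
  unfold Spec_build_episode_summary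
  unfold build_episode_summary build_episode_summary_alt
  rw [pv_tally episodes hpre]
  simp only [zero_add]
  exact pv_format _ _ _ _ _
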